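-- pv_equiv track=rewrite | github.com/p0rkchop/archiveinator | archiveinator/steps/image_dedup.py | _best_url
-- ===== SOURCE A (Python) =====
-- import contextlib
--
-- MAX_WIDTH = 1200
--
-- def _parse_srcset(srcset: str) -> list[tuple[str, int]]:
--     """Parse a srcset string into (url, width) pairs.
--
--     Width is 0 for density descriptors (1x, 2x) or entries with no descriptor.
--     """
--     entries: list[tuple[str, int]] = []
--     for part in srcset.split(","):
--         part = part.strip()
--         if not part:
--             continue
--         tokens = part.split()
--         if not tokens:
--             continue
--         url = tokens[0]
--         width = 0
--         if len(tokens) > 1: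
--             descriptor = tokens[1]
--             if descriptor.endswith("w"):
--                 with contextlib.suppress(ValueError):
--                     width = int(descriptor[:-1])
--         entries.append((url, width))
--     return entries
--
-- def _best_url(srcset: str) -> str | None:
--     """Return the single best image URL from a srcset string."""
--     entries = _parse_srcset(srcset)
--     if not entries:
--         return None
--
--     widths = [(url, w) for url, w in entries if w > 0]
--     if widths:
--         under = [(url, w) for url, w in widths if w <= MAX_WIDTH]
--         if under:
--             return max(under, key=lambda x: x[1])[0]
--         return min(widths, key=lambda x: x[1])[0]
--
--     # No width descriptors — take the last entry (conventionally highest quality)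
--     return entries[-1][0]
-- ===== SOURCE B (Python) =====
-- MAX_WIDTH = 1200
--
--
-- def _parse_srcset(srcset: str) -> list[tuple[str, int]]:
--     """Parse a srcset string into (url, width) pairs."""
--     entries: list[tuple[str, int]] = []
--     for part in srcset.split(","):
--         part = part.strip()
--         if not part:
--             continue
--         tokens = part.split()
--         if not tokens:
--             continue
--         url = tokens[0]
--         width = 0
--         if len(tokens) > 1:
--             descriptor = tokens[1]
--             if descriptor.endswith("w"):
--                 try:
--                     width = int(descriptor[:-1])
--                 except ValueError:
--                     pass
--         entries.append((url, width))
--     return entries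
--
--
-- def _best_url(srcset: str) -> str | None:
--     """Single pass over the parsed entries: keep the running best candidate
--     under MAX_WIDTH, the running smallest positive width, and the last url."""
--     best_under = None   # (url, w): max w among 0 < w <= MAX_WIDTH, first on ties
--     best_positive = None  # (url, w): min w among w > 0, first on ties
--     last_url = None
--     for url, w in _parse_srcset(srcset):
--         if 0 < w <= MAX_WIDTH and (best_under is None or best_under[1] < w):
--             best_under = (url, w)
--         if 0 < w and (best_positive is None or w < best_positive[1]):
--             best_positive = (url, w)
--         last_url = url
--     if best_under is not None:
--         return best_under[0]
--     if best_positive is not None: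
--         return best_positive[0]
--     return last_url
-- ===== Notes on version B (the rewrite author's own statement) =====
-- stated objective: alternative
-- what changed: The filter/filter/max/min multi-pass selection over the parsed entries is replaced by a single left-to-right fold maintaining the running best width under MAX_WIDTH, the running minimal positive width, and the last url.
import Mathlib
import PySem

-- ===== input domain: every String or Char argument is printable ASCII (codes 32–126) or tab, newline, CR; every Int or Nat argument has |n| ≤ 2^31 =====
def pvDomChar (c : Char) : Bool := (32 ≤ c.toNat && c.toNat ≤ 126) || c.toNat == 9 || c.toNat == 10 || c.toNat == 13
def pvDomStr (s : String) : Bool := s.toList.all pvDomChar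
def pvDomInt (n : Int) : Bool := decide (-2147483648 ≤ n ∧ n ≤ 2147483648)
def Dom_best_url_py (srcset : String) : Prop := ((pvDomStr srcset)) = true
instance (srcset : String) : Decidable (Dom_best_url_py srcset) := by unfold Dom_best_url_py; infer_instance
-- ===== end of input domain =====

-- B replaces A's filter/filter/max/min selection by one fold over the parsed
-- entries (objective: alternative, same asymptotic cost, one pass).
-- The helper _parse_srcset is identical in both Pythons and is shared here.

-- ===== PORT A =====
-- shared helper: _parse_srcset (identical in Source A and Source B)
def parse_srcset (srcset : String) : List (String × Int) :=
  ((PySem.Str.split? srcset ",").getD []).foldl (fun entries part0 =>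
    let part := PySem.Str.strip part0
    if part = "" then entries
    else
      match PySem.Str.split₀ part with
      | [] => entries
      | url :: rest =>
        let width : Int :=
          match rest with
          | [] => 0
          | descriptor :: _ =>
            if PySem.Str.endswith descriptor "w" then
              match PySem.Int.ofStr? (PySem.Str.slice descriptor none (some (-1))) with
              | some n => n
              | none => 0
            else 0
        entries ++ [(url, width)]) []

def best_url_py (srcset : String) : Option String :=
  let entries := parse_srcset srcset
  if entries = [] then none
  else
    let widths := entries.filter (fun e => decide (e.2 > 0))
    if widths ≠ [] then
      let under := widths.filter (fun e => decide (e.2 ≤ 1200))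
      if under ≠ [] then (PySem.List.max? under (fun x => x.2)).map (fun x => x.1)
      else (PySem.List.min? widths (fun x => x.2)).map (fun x => x.1)
    else (PySem.List.pyGet? entries (-1)).map (fun x => x.1)

-- ===== PORT B =====
-- one loop body: update best_under, best_positive, last_url
def bstep (s : Option (String × Int) × Option (String × Int) × Option String)
    (e : String × Int) : Option (String × Int) × Option (String × Int) × Option String :=
  ( (if 0 < e.2 ∧ e.2 ≤ 1200 then
       match s.1 with
       | none => some e
       | some m => if m.2 < e.2 then some e else some m
     else s.1)
  , (if 0 < e.2 then
       match s.2.1 with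
       | none => some e
       | some m => if e.2 < m.2 then some e else some m
     else s.2.1)
  , some e.1 )

def best_url_py_alt (srcset : String) : Option String :=
  let s := (parse_srcset srcset).foldl bstep (none, none, none)
  match s.1 with
  | some (u, _) => some u
  | none =>
    match s.2.1 with
    | some (u, _) => some u
    | none => s.2.2

-- ===== PRECONDITION & SPEC =====
def Spec_best_url_py (srcset : String) (out : Option String) : Prop := out = best_url_py_alt srcset
instance (srcset : String) (out : Option String) : Decidable (Spec_best_url_py srcset out) := by unfold Spec_best_url_py; infer_instance

-- ===== CLAIM (what is proved, stated in full; the proofs are below) =====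
def Claim_equal_best_url_py : Prop := ∀ (srcset : String), Dom_best_url_py srcset → Spec_best_url_py srcset (best_url_py srcset)

-- ===== LEMMAS AND PROOFS =====

theorem fold_bstep (l : List (String × Int))
    (s : Option (String × Int) × Option (String × Int) × Option String) :
    l.foldl bstep s =
      ( l.foldl (fun acc e => if 0 < e.2 ∧ e.2 ≤ 1200 then
          (match acc with
           | none => some e
           | some m => if m.2 < e.2 then some e else some m) else acc) s.1
      , l.foldl (fun acc e => if 0 < e.2 then
          (match acc with
           | none => some e
           | some m => if e.2 < m.2 then some e else some m) else acc) s.2.1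
      , l.foldl (fun _acc e => some e.1) s.2.2 ) := by
  induction l generalizing s with
  | nil => rfl
  | cons h t ih => simp [List.foldl_cons, ih, bstep]

theorem filter_pos_le (l : List (String × Int)) :
    (l.filter (fun e => decide (e.2 > 0))).filter (fun e => decide (e.2 ≤ 1200)) =
      l.filter (fun e => decide (0 < e.2 ∧ e.2 ≤ 1200)) := by
  induction l with
  | nil => rfl
  | cons h t ih =>
    by_cases h1 : 0 < h.2 <;> by_cases h2 : h.2 ≤ 1200 <;>
      simp [h1, h2, ih]

theorem last_fold (l : List (String × Int)) (s : Option String) (hl : l ≠ []) :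
    l.foldl (fun _ e => some e.1) s = (l.getLast?).map (fun x => x.1) := by
  induction l generalizing s with
  | nil => exact absurd rfl hl
  | cons h t ih =>
    cases t with
    | nil => rfl
    | cons h' t' => simpa using ih (some h.1) (by simp)

theorem pyGet_neg_one (l : List (String × Int)) (hl : l ≠ []) :
    PySem.List.pyGet? l (-1) = l.getLast? := by
  cases l with
  | nil => exact absurd rfl hl
  | cons h t =>
    simp [PySem.List.pyGet?, PySem.List.pyIdx?, List.getLast?_eq_getElem?]

theorem min?_fold (l : List (String × Int)) :
    l.foldl (fun acc e =>
      match acc with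
      | none => some e
      | some m => if e.2 < m.2 then some e else some m) none =
    PySem.List.min? l (fun x => x.2) := by
  unfold PySem.List.min?
  congr 1
  funext acc e
  cases acc <;> rfl

theorem max?_fold (l : List (String × Int)) :
    l.foldl (fun acc e =>
      match acc with
      | none => some e
      | some m => if m.2 < e.2 then some e else some m) none =
    PySem.List.max? l (fun x => x.2) := by
  unfold PySem.List.max?
  congr 1
  funext acc e
  cases acc <;> rfl

theorem best_url_py_spec : Claim_equal_best_url_py := by
  intro srcset _
  unfold Spec_best_url_py best_url_py best_url_py_alt
  set l := parse_srcset srcset with hl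
  clear_value l
  rw [fold_bstep]
  simp only
  rw [show (fun (acc : Option (String × Int)) (e : String × Int) =>
        if 0 < e.2 ∧ e.2 ≤ 1200 then
          (match acc with
           | none => some e
           | some m => if m.2 < e.2 then some e else some m) else acc) =
      (fun acc e => if (fun e : String × Int => 0 < e.2 ∧ e.2 ≤ 1200) e then
          (fun (acc : Option (String × Int)) (e : String × Int) =>
            match acc with
            | none => some e
            | some m => if m.2 < e.2 then some e else some m) acc e else acc) from rfl,
      PySem.List.foldl_ite_eq_foldl_filter]
  rw [show (fun (acc : Option (String × Int)) (e : String × Int) =>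
        if 0 < e.2 then
          (match acc with
           | none => some e
           | some m => if e.2 < m.2 then some e else some m) else acc) =
      (fun acc e => if (fun e : String × Int => 0 < e.2) e then
          (fun (acc : Option (String × Int)) (e : String × Int) =>
            match acc with
            | none => some e
            | some m => if e.2 < m.2 then some e else some m) acc e else acc) from rfl,
      PySem.List.foldl_ite_eq_foldl_filter]
  by_cases h0 : l = []
  · subst h0; rfl
  · rw [if_neg h0]
    have hpos : (fun e : String × Int => decide (0 < e.2)) = fun e => decide (e.2 > 0) := rfl
    rw [hpos]
    by_cases hw : l.filter (fun e => decide (e.2 > 0)) = []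
    · -- no positive widths: both filters empty, B returns last url
      rw [if_neg (not_not_intro hw)]
      have hconj : l.filter (fun e => decide (0 < e.2 ∧ e.2 ≤ 1200)) = [] := by
        rw [List.filter_eq_nil_iff] at hw ⊢
        intro a ha hcon
        exact hw a ha (by simp at hcon ⊢; omega)
      rw [hconj, hw]
      simp [last_fold l none h0, pyGet_neg_one l h0]
    · rw [if_pos hw]
      by_cases hu : (l.filter (fun e => decide (e.2 > 0))).filter (fun e => decide (e.2 ≤ 1200)) = []
      · -- positive widths but none under MAX: B falls through to best_positive = min
        rw [if_neg (not_not_intro hu)]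
        have hconj : l.filter (fun e => decide (0 < e.2 ∧ e.2 ≤ 1200)) = [] := by
          rw [← filter_pos_le]; exact hu
        rw [hconj]
        simp only [List.foldl_nil]
        obtain ⟨m, hm⟩ : ∃ m, PySem.List.min? (l.filter (fun e => decide (e.2 > 0))) (fun x => x.2) = some m := by
          cases hmm : PySem.List.min? (l.filter (fun e => decide (e.2 > 0))) (fun x => x.2) with
          | none => exact absurd ((PySem.List.min?_eq_none_iff _ _).mp hmm) hw
          | some m => exact ⟨m, rfl⟩
        rw [hm]
        have : (l.filter (fun e => decide (e.2 > 0))).foldl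
            (fun (acc : Option (String × Int)) (e : String × Int) =>
              match acc with
              | none => some e
              | some m => if e.2 < m.2 then some e else some m) none = some m := by
          rw [min?_fold]; exact hm
        rw [this]
        obtain ⟨u, w⟩ := m
        rfl
      · -- some width under MAX: B returns best_under = max of under
        rw [if_pos hu]
        obtain ⟨m, hm⟩ : ∃ m, PySem.List.max? ((l.filter (fun e => decide (e.2 > 0))).filter (fun e => decide (e.2 ≤ 1200))) (fun x => x.2) = some m := by
          cases hmm : PySem.List.max? ((l.filter (fun e => decide (e.2 > 0))).filter (fun e => decide (e.2 ≤ 1200))) (fun x => x.2) with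
          | none => exact absurd ((PySem.List.max?_eq_none_iff _ _).mp hmm) hu
          | some m => exact ⟨m, rfl⟩
        rw [hm]
        have : (l.filter (fun e => decide (0 < e.2 ∧ e.2 ≤ 1200))).foldl
            (fun (acc : Option (String × Int)) (e : String × Int) =>
              match acc with
              | none => some e
              | some m => if m.2 < e.2 then some e else some m) none = some m := by
          rw [max?_fold, ← filter_pos_le]; exact hm
        rw [this]
        obtain ⟨u, w⟩ := m
        rfl

-- ===== VERDICT (by name: the statement is the Claim_ definition above) =====
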